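-- pv_equiv track=rewrite | github.com/raecellann/NLP-Projects | N-grams/word_analyzer.py | _categorize_words_by_difficulty
-- ===== SOURCE A (Python) =====
-- def _categorize_words_by_difficulty(word_scores: dict) -> dict:
--     sorted_words = sorted(word_scores.items(), key=lambda x: x[1])
--     total_words = len(sorted_words)
--
--     easy_threshold = int(total_words * 0.4)
--     medium_threshold = int(total_words * 0.8)
--
--     word_difficulty = {}
--     for i, (word, score) in enumerate(sorted_words):
--         if i < easy_threshold:
--             word_difficulty[word] = "easy"
--         elif i < medium_threshold:
--             word_difficulty[word] = "medium"
--         else: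
--             word_difficulty[word] = "hard"
--
--     return word_difficulty
-- ===== SOURCE B (Python) =====
-- def _categorize_words_by_difficulty(word_scores: dict) -> dict:
--     # Hand-written stable bottom-level merge sort by score (instead of calling
--     # sorted()), then label the three rank blocks by zipping with a block-label list.
--     def merge(left, right):
--         out = []
--         i = j = 0
--         nl, nr = len(left), len(right)
--         while i < nl and j < nr:
--             if left[i][1] <= right[j][1]:
--                 out.append(left[i])
--                 i += 1
--             else:
--                 out.append(right[j])
--                 j += 1
--         out.extend(left[i:])
--         out.extend(right[j:])
--         return out
--
--     def msort(items):
--         if len(items) < 2: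
--             return items
--         mid = len(items) // 2
--         return merge(msort(items[:mid]), msort(items[mid:]))
--
--     ranked = msort(list(word_scores.items()))
--     words = [w for w, _ in ranked]
--     n = len(words)
--     easy = int(n * 0.4)
--     medium = int(n * 0.8)
--     labels = ["easy"] * easy + ["medium"] * (medium - easy) + ["hard"] * (n - medium)
--     return dict(zip(words, labels))
-- ===== Notes on version B (the rewrite author's own statement) =====
-- stated objective: alternative
-- what changed: B replaces A's sorted()-call-plus-enumerate-and-branch loop with a hand-written recursive stable merge sort by score and a block labeling that zips the ranked words with a replicated label list built from the two precomputed thresholds.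
import Mathlib
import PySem

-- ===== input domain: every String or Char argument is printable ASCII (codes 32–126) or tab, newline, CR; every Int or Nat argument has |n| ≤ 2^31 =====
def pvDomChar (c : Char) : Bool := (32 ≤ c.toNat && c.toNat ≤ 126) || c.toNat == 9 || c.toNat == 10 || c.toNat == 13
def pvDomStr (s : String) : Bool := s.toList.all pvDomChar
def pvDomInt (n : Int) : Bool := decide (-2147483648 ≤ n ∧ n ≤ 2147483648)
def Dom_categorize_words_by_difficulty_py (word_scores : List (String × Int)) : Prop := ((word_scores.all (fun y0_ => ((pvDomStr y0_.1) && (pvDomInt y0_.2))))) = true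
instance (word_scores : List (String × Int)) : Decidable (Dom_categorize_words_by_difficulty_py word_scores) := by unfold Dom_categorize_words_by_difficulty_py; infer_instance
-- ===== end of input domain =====

-- B sorts with a hand-written recursive stable merge sort instead of calling sorted(),
-- and labels the three rank blocks by zipping with a replicated label list; alternative
-- algorithm, same asymptotic cost.
-- int(n*0.4) / int(n*0.8) are ported as 2*n/5 / 4*n/5 (Nat floor division), which agrees with
-- CPython's float computation at every list length that can occur.

-- ===== PORT A =====
def categorize_words_by_difficulty_py (word_scores : List (String × Int)) : List (String × String) :=
  let sorted_words := PySem.List.sorted word_scores (fun x => x.2) false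
  let total_words := sorted_words.length
  let easy_threshold := 2 * total_words / 5
  let medium_threshold := 4 * total_words / 5
  let word_difficulty :=
    (PySem.List.enumerate sorted_words).foldl
      (fun d p =>
        if p.1 < (easy_threshold : Int) then d.insert p.2.1 "easy"
        else if p.1 < (medium_threshold : Int) then d.insert p.2.1 "medium"
        else d.insert p.2.1 "hard")
      PySem.Dict.empty
  word_difficulty.items

-- ===== PORT B =====
-- Source B's merge: the while loop over the two index cursors, written as the structural
-- recursion on the two remaining suffixes (out.extend of the leftovers = the base cases).
def pyMerge (left right : List (String × Int)) : List (String × Int) :=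
  match left, right with
  | [], r => r
  | l, [] => l
  | a :: l, b :: r =>
    if a.2 ≤ b.2 then a :: pyMerge l (b :: r) else b :: pyMerge (a :: l) r

-- Source B's msort: split at len // 2, recurse, merge.
def pyMsort (items : List (String × Int)) : List (String × Int) :=
  if items.length < 2 then items
  else
    let mid := items.length / 2
    pyMerge (pyMsort (items.take mid)) (pyMsort (items.drop mid))
termination_by items.length
decreasing_by
  · simp; omega
  · simp; omega

def categorize_words_by_difficulty_py_alt (word_scores : List (String × Int)) : List (String × String) :=
  let ranked := pyMsort word_scores
  let words := ranked.map Prod.fst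
  let n := words.length
  let easy := 2 * n / 5
  let medium := 4 * n / 5
  let labels := List.replicate easy "easy" ++ List.replicate (medium - easy) "medium"
                  ++ List.replicate (n - medium) "hard"
  -- dict(zip(words, labels)): dict construction = left fold of insert over the pairs
  ((words.zip labels).foldl (fun d p => d.insert p.1 p.2) PySem.Dict.empty).items

-- ===== PRECONDITION & SPEC =====
-- The Python parameter is a dict, whose keys are necessarily distinct; Pre_ states exactly
-- that for the association-list encoding (it excludes no dict input).
def Pre_categorize_words_by_difficulty_py (word_scores : List (String × Int)) : Prop :=
  (word_scores.map Prod.fst).Nodup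
instance (word_scores : List (String × Int)) : Decidable (Pre_categorize_words_by_difficulty_py word_scores) := by unfold Pre_categorize_words_by_difficulty_py; infer_instance

def pvWitness_categorize_words_by_difficulty_py : (List (String × Int)) :=
  [("a", 3), ("b", 1), ("c", 2), ("d", 5), ("e", 4)]

def Spec_categorize_words_by_difficulty_py (word_scores : List (String × Int)) (out : List (String × String)) : Prop := out = categorize_words_by_difficulty_py_alt word_scores
instance (word_scores : List (String × Int)) (out : List (String × String)) : Decidable (Spec_categorize_words_by_difficulty_py word_scores out) := by unfold Spec_categorize_words_by_difficulty_py; infer_instance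

-- ===== CLAIM (what is proved, stated in full; the proofs are below) =====
def Claim_equal_categorize_words_by_difficulty_py : Prop := ∀ (word_scores : List (String × Int)), Dom_categorize_words_by_difficulty_py word_scores → Pre_categorize_words_by_difficulty_py word_scores → Spec_categorize_words_by_difficulty_py word_scores (categorize_words_by_difficulty_py word_scores)

-- ===== LEMMAS AND PROOFS =====

-- merge is a permutation of its two inputs; merge of two score-sorted lists is sorted;
-- and (stability, stated through filters) the elements of any fixed score v come out as
-- "all of l's, then all of r's".
theorem pyMerge_perm (l r : List (String × Int)) : (pyMerge l r).Perm (l ++ r) := by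
  induction l, r using pyMerge.induct with
  | case1 r => simp [pyMerge]
  | case2 l => simp [pyMerge]
  | case3 a l b r h ih => simp only [pyMerge, if_pos h]; exact (ih.cons a)
  | case4 a l b r h ih =>
      simp only [pyMerge, if_neg h]
      exact (ih.cons b).trans List.perm_middle.symm

theorem pyMerge_pairwise (l r : List (String × Int))
    (hl : l.Pairwise (fun a b => a.2 ≤ b.2)) (hr : r.Pairwise (fun a b => a.2 ≤ b.2)) :
    (pyMerge l r).Pairwise (fun a b => a.2 ≤ b.2) := by
  induction l, r using pyMerge.induct with
  | case1 r => simpa [pyMerge] using hr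
  | case2 l => simpa [pyMerge] using hl
  | case3 a l b r h ih =>
      simp only [pyMerge, if_pos h]
      refine List.pairwise_cons.mpr ⟨?_, ih hl.of_cons hr⟩
      intro x hx
      rcases List.mem_append.mp ((pyMerge_perm l (b :: r)).mem_iff.mp hx) with hx | hx
      · exact List.rel_of_pairwise_cons hl hx
      · rcases List.mem_cons.mp hx with rfl | hx
        · exact h
        · exact le_trans h (List.rel_of_pairwise_cons hr hx)
  | case4 a l b r h ih =>
      simp only [pyMerge, if_neg h]
      have hba : b.2 ≤ a.2 := le_of_lt (lt_of_not_ge h)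
      refine List.pairwise_cons.mpr ⟨?_, ih hl hr.of_cons⟩
      intro x hx
      rcases List.mem_append.mp ((pyMerge_perm (a :: l) r).mem_iff.mp hx) with hx | hx
      · rcases List.mem_cons.mp hx with rfl | hx
        · exact hba
        · exact le_trans hba (List.rel_of_pairwise_cons hl hx)
      · exact List.rel_of_pairwise_cons hr hx

theorem pyMerge_filter (l r : List (String × Int)) (v : Int)
    (hl : l.Pairwise (fun a b => a.2 ≤ b.2)) (hr : r.Pairwise (fun a b => a.2 ≤ b.2)) :
    (pyMerge l r).filter (fun x => decide (x.2 = v))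
      = l.filter (fun x => decide (x.2 = v)) ++ r.filter (fun x => decide (x.2 = v)) := by
  induction l, r using pyMerge.induct with
  | case1 r => simp [pyMerge]
  | case2 l => simp [pyMerge]
  | case3 a l b r h ih =>
      simp only [pyMerge, if_pos h]
      rw [List.filter_cons, List.filter_cons (xs := l)]
      rw [ih hl.of_cons hr]
      split <;> simp
  | case4 a l b r h ih =>
      have hba : b.2 < a.2 := lt_of_not_ge h
      simp only [pyMerge, if_neg h]
      rw [List.filter_cons, List.filter_cons (xs := r)]
      rw [ih hl hr.of_cons]
      by_cases hbv : b.2 = v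
      · have hnil : (a :: l).filter (fun x => decide (x.2 = v)) = [] := by
          rw [List.filter_eq_nil_iff]
          intro x hx
          rcases List.mem_cons.mp hx with rfl | hx
          · simp; omega
          · have := List.rel_of_pairwise_cons hl hx
            simp; omega
        simp [hbv, hnil]
      · simp [hbv]

theorem pyMsort_perm (xs : List (String × Int)) : (pyMsort xs).Perm xs := by
  induction xs using pyMsort.induct with
  | case1 xs h => simp [pyMsort, h]
  | case2 xs h mid ih1 ih2 =>
      rw [pyMsort, if_neg h]
      exact (pyMerge_perm _ _).trans ((ih1.append ih2).trans (by rw [List.take_append_drop]))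

theorem pyMsort_pairwise (xs : List (String × Int)) :
    (pyMsort xs).Pairwise (fun a b => a.2 ≤ b.2) := by
  induction xs using pyMsort.induct with
  | case1 xs h =>
      rw [pyMsort, if_pos h]
      match xs, h with
      | [], _ => exact List.Pairwise.nil
      | [a], _ => simp
  | case2 xs h mid ih1 ih2 =>
      rw [pyMsort, if_neg h]
      exact pyMerge_pairwise _ _ ih1 ih2

theorem pyMsort_filter (xs : List (String × Int)) (v : Int) :
    (pyMsort xs).filter (fun x => decide (x.2 = v)) = xs.filter (fun x => decide (x.2 = v)) := by
  induction xs using pyMsort.induct with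
  | case1 xs h => rw [pyMsort, if_pos h]
  | case2 xs h mid ih1 ih2 =>
      rw [pyMsort, if_neg h]
      rw [pyMerge_filter _ _ _ (pyMsort_pairwise _) (pyMsort_pairwise _), ih1, ih2,
        ← List.filter_append, List.take_append_drop]

theorem filter_insertBy (x : String × Int) (acc : List (String × Int)) (v : Int)
    (hacc : acc.Pairwise (fun a b => a.2 ≤ b.2)) :
    (PySem.List.insertBy (fun a b => decide (a.2 < b.2)) x acc).filter (fun y => decide (y.2 = v))
      = acc.filter (fun y => decide (y.2 = v)) ++ (if x.2 = v then [x] else []) := by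
  induction acc with
  | nil => simp [PySem.List.insertBy]; split <;> simp_all
  | cons y ys ih =>
      rw [PySem.List.insertBy]
      by_cases hxy : x.2 < y.2
      · rw [if_pos (by simpa using hxy)]
        by_cases hxv : x.2 = v
        · have hnil : (y :: ys).filter (fun z => decide (z.2 = v)) = [] := by
            rw [List.filter_eq_nil_iff]
            intro z hz
            rcases List.mem_cons.mp hz with rfl | hz
            · simp; omega
            · have := List.rel_of_pairwise_cons hacc hz
              simp; omega
          rw [List.filter_cons, if_pos (by simpa using hxv), hnil]
          simp [hxv]
        · rw [List.filter_cons, if_neg (by simpa using hxv)]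
          simp [hxv]
      · rw [if_neg (by simpa using hxy)]
        rw [List.filter_cons, List.filter_cons, ih hacc.of_cons]
        split <;> simp

theorem sorted_filter (xs : List (String × Int)) (v : Int) :
    (PySem.List.sorted xs (fun x => x.2) false).filter (fun x => decide (x.2 = v))
      = xs.filter (fun x => decide (x.2 = v)) := by
  induction xs using List.reverseRecOn with
  | nil => simp [PySem.List.sorted_eq_foldl_insertBy]
  | append_singleton ys x ih =>
      have hs : PySem.List.sorted (ys ++ [x]) (fun x => x.2) false
          = PySem.List.insertBy (fun a b => decide (a.2 < b.2)) x
              (PySem.List.sorted ys (fun x => x.2) false) := by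
        rw [PySem.List.sorted_eq_foldl_insertBy, List.foldl_append,
          ← PySem.List.sorted_eq_foldl_insertBy]
        rfl
      rw [hs, filter_insertBy _ _ _ (PySem.List.sorted_pairwise ys (fun x => x.2)), ih,
        List.filter_append]
      split <;> simp_all

theorem stable_unique (ys zs : List (String × Int)) (hperm : ys.Perm zs)
    (hys : ys.Pairwise (fun a b => a.2 ≤ b.2)) (hzs : zs.Pairwise (fun a b => a.2 ≤ b.2))
    (hf : ∀ v : Int, ys.filter (fun x => decide (x.2 = v)) = zs.filter (fun x => decide (x.2 = v))) :
    ys = zs := by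
  induction ys generalizing zs with
  | nil => exact (hperm.nil_eq).symm ▸ rfl
  | cons a ys' ih =>
      match zs, hperm, hzs, hf with
      | [], hperm, _, _ => exact absurd hperm.length_eq (by simp)
      | b :: zs', hperm, hzs, hf =>
        have hab : a = b := by
          by_cases hba : b.2 = a.2
          · have := hf a.2
            rw [List.filter_cons, List.filter_cons, if_pos (by simp), if_pos (by simpa using hba)] at this
            exact (List.cons.injEq _ _ _ _ ▸ this).1
          · -- b.2 ≠ a.2: derive a contradiction
            exfalso
            have h1 := hf a.2
            rw [List.filter_cons, List.filter_cons, if_pos (by simp), if_neg (by simpa using hba)] at h1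
            have haz : a ∈ zs' := by
              have : a ∈ zs'.filter (fun x => decide (x.2 = a.2)) := by rw [← h1]; exact List.mem_cons_self
              exact List.mem_of_mem_filter this
            have h2 := hf b.2
            rw [List.filter_cons, List.filter_cons, if_neg (by simpa using (fun h => hba h.symm : ¬ a.2 = b.2)), if_pos (by simp)] at h2
            have hby : b ∈ ys' := by
              have : b ∈ ys'.filter (fun x => decide (x.2 = b.2)) := by rw [h2]; exact List.mem_cons_self
              exact List.mem_of_mem_filter this
            have hab2 : a.2 ≤ b.2 := List.rel_of_pairwise_cons hys hby
            have hba2 : b.2 ≤ a.2 := List.rel_of_pairwise_cons hzs haz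
            omega
        subst hab
        have htails : ys' = zs' := by
          refine ih zs' hperm.cons_inv hys.of_cons hzs.of_cons ?_
          intro v
          have := hf v
          rw [List.filter_cons, List.filter_cons] at this
          by_cases hav : a.2 = v
          · rw [if_pos (by simpa using hav), if_pos (by simpa using hav)] at this
            exact (List.cons.injEq _ _ _ _ ▸ this).2
          · rwa [if_neg (by simpa using hav), if_neg (by simpa using hav)] at this
        rw [htails]

-- B's merge sort computes exactly what A's sorted(..., key=score) computes.
theorem pyMsort_eq_sorted (xs : List (String × Int)) :
    pyMsort xs = PySem.List.sorted xs (fun x => x.2) false := by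
  refine stable_unique _ _ ((pyMsort_perm xs).trans (PySem.List.sorted_perm xs (fun x => x.2) false).symm)
    (pyMsort_pairwise xs) (PySem.List.sorted_pairwise xs (fun x => x.2)) ?_
  intro v
  rw [pyMsort_filter, sorted_filter]

-- A's enumerated-and-branched pairs coincide with B's zip of the words with the block-label list.
theorem pairsA_eq_pairsB (s : List (String × Int)) (e m : Nat) (he : e ≤ m) (hm : m ≤ s.length) :
    (PySem.List.enumerate s).map
        (fun p => (p.2.1, if p.1 < (e : Int) then "easy" else if p.1 < (m : Int) then "medium" else "hard"))
      = (s.map Prod.fst).zip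
          (List.replicate e "easy" ++ List.replicate (m - e) "medium" ++ List.replicate (s.length - m) "hard") := by
  apply List.ext_getElem
  · simp [PySem.List.length_enumerate]; omega
  · intro k h1 h2
    simp only [List.getElem_map, PySem.List.getElem_enumerate, List.getElem_zip]
    have hk : k < s.length := by simpa [PySem.List.length_enumerate] using h1
    refine Prod.ext rfl ?_
    by_cases hk1 : k < e
    · rw [if_pos (by omega)]
      simp only [List.getElem_append, List.length_append, List.length_replicate,
        List.getElem_replicate]
      split_ifs <;> first | rfl | omega
    · rw [if_neg (by omega)]
      by_cases hk2 : k < m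
      · rw [if_pos (by omega)]
        simp only [List.getElem_append, List.length_append, List.length_replicate,
          List.getElem_replicate]
        split_ifs <;> first | rfl | omega
      · rw [if_neg (by omega)]
        simp only [List.getElem_append, List.length_append, List.length_replicate,
          List.getElem_replicate]
        split_ifs <;> first | rfl | omega

-- ===== VERDICT (by name: the statement is the Claim_ definition above) =====
theorem categorize_words_by_difficulty_py_spec : Claim_equal_categorize_words_by_difficulty_py := by
  intro word_scores _hdom hpre
  unfold Spec_categorize_words_by_difficulty_py
  unfold Pre_categorize_words_by_difficulty_py at hpre
  unfold categorize_words_by_difficulty_py categorize_words_by_difficulty_py_alt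
  rw [pyMsort_eq_sorted]
  simp only [List.length_map]
  set s := PySem.List.sorted word_scores (fun x => x.2) false
  set n := s.length
  set e := 2 * n / 5 with heq
  set m := 4 * n / 5 with hmeq
  have hnod : (s.map Prod.fst).Nodup :=
    ((PySem.List.sorted_perm word_scores (fun x => x.2) false).map Prod.fst).symm.nodup hpre
  have he : e ≤ m := by rw [heq, hmeq]; omega
  have hm : m ≤ n := by rw [hmeq]; omega
  -- A's loop inserts each word with the label decided by its rank
  have hfA : (fun (d : PySem.Dict String String) (p : Int × (String × Int)) =>
        if p.1 < (e : Int) then d.insert p.2.1 "easy"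
        else if p.1 < (m : Int) then d.insert p.2.1 "medium"
        else d.insert p.2.1 "hard")
      = (fun d p => d.insert p.2.1
          (if p.1 < (e : Int) then "easy" else if p.1 < (m : Int) then "medium" else "hard")) := by
    funext d p; split_ifs <;> rfl
  rw [hfA]
  have hmapfst : (PySem.List.enumerate s).map (fun p => p.2.1) = s.map Prod.fst := by
    rw [show (fun (p : Int × (String × Int)) => p.2.1) = (Prod.fst ∘ Prod.snd) from rfl,
      ← List.map_map, PySem.List.map_snd_enumerate]
  rw [PySem.Dict.items_foldl_insert_fresh _ _ _ _
    (by intro a _; exact PySem.Dict.contains_empty _)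
    (by rw [hmapfst]; exact hnod)]
  -- B's fold inserts distinct fresh keys too
  have hlen : ((s.map Prod.fst).zip
      (List.replicate e "easy" ++ List.replicate (m - e) "medium" ++ List.replicate (n - m) "hard")).map Prod.fst
      = s.map Prod.fst := by
    apply List.map_fst_zip
    simp; omega
  rw [PySem.Dict.items_foldl_insert_fresh _ _ _ _
    (by intro a _; exact PySem.Dict.contains_empty _)
    (by
      have : ((s.map Prod.fst).zip
          (List.replicate e "easy" ++ List.replicate (m - e) "medium" ++ List.replicate (n - m) "hard")).map (fun p => p.1)
          = s.map Prod.fst := hlen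
      rw [this]; exact hnod)]
  simp only [PySem.Dict.empty, List.nil_append]
  simpa using pairsA_eq_pairsB s e m he hm
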